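-- pv_equiv track=rewrite | github.com/kevinnbass/TestMaster | organized_codebase/testing/crypto_analysis.py | _get_improvement_priorities
-- ===== SOURCE A (Python) =====
-- from typing import Dict, List, Any, Set, Tuple, Optional
--
-- def _get_improvement_priorities(issues: List[Dict], key_mgmt: Dict,
--                               ssl_analysis: Dict, random_analysis: Dict) -> List[str]:
--     """Get prioritized list of improvements needed."""
--     priorities = []
--
--     # High priority issues
--     critical_issues = [i for i in issues if i['severity'] == 'CRITICAL']
--     if critical_issues:
--         priorities.append('Fix critical cryptographic vulnerabilities')
--
--     high_issues = [i for i in issues if i['severity'] == 'HIGH']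
--     if high_issues:
--         priorities.append('Address high-severity crypto issues')
--
--     if key_mgmt.get('key_management_issues'):
--         priorities.append('Improve key management practices')
--
--     if ssl_analysis.get('ssl_issues'):
--         priorities.append('Fix SSL/TLS configuration issues')
--
--     if random_analysis.get('weak_randomness_issues'):
--         priorities.append('Replace weak random number generation')
--
--     # Medium priority
--     medium_issues = [i for i in issues if i['severity'] == 'MEDIUM']
--     if medium_issues:
--         priorities.append('Resolve medium-severity crypto issues')
--
--     return priorities[:5]  # Return top 5 priorities
-- ===== SOURCE B (Python) =====
-- def _get_improvement_priorities(issues, key_mgmt, ssl_analysis, random_analysis):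
--     """Get prioritized list of improvements needed."""
--     # one accumulator pass over issues (instead of three separate scans)
--     has_crit = has_high = has_med = False
--     for i in issues:
--         s = i['severity']
--         has_crit = has_crit or s == 'CRITICAL'
--         has_high = has_high or s == 'HIGH'
--         has_med = has_med or s == 'MEDIUM'
--     checks = [
--         (has_crit, 'Fix critical cryptographic vulnerabilities'),
--         (has_high, 'Address high-severity crypto issues'),
--         (bool(key_mgmt.get('key_management_issues')), 'Improve key management practices'),
--         (bool(ssl_analysis.get('ssl_issues')), 'Fix SSL/TLS configuration issues'),
--         (bool(random_analysis.get('weak_randomness_issues')), 'Replace weak random number generation'),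
--         (has_med, 'Resolve medium-severity crypto issues'),
--     ]
--     def build(checks, budget):
--         # recursive budgeted builder: stops as soon as 5 messages are emitted,
--         # never materializes a longer list to slice
--         if budget == 0 or not checks:
--             return []
--         (flag, msg), rest = checks[0], checks[1:]
--         if flag:
--             return [msg] + build(rest, budget - 1)
--         return build(rest, budget)
--     return build(checks, 5)
-- ===== Notes on version B (the rewrite author's own statement) =====
-- stated objective: alternative
-- what changed: A single accumulator fold over issues computes the three severity flags (replacing A's three list-comprehension scans), and a recursive budgeted builder emits at most 5 messages directly, replacing A's append-then-slice if-chain.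
import Mathlib
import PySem

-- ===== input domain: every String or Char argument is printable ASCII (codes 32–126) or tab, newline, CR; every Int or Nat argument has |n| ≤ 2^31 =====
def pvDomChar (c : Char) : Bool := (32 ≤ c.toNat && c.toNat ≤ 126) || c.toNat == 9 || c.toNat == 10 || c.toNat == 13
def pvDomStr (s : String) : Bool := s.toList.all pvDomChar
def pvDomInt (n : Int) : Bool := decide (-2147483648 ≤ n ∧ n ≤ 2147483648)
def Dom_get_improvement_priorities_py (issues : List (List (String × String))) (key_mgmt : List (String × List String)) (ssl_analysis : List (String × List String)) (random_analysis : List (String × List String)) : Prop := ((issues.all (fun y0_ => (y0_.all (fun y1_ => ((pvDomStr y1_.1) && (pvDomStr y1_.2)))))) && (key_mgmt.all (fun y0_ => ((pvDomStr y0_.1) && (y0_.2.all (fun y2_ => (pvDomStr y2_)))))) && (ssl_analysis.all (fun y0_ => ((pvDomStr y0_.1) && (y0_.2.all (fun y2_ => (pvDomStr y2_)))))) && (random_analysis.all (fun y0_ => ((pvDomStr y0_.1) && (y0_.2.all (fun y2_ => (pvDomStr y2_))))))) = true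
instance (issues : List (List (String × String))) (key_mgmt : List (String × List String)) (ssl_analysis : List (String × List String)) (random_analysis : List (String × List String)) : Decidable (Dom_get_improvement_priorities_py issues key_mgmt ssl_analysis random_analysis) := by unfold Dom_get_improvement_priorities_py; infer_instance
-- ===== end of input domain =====

-- B replaces A's three separate scans of `issues` by one accumulator fold computing
-- the three severity flags, and replaces the append-then-slice if-chain by a
-- recursive budgeted builder that emits at most 5 messages — same return value.

-- i['severity'] for an issue dict (KeyError when absent is excluded by Pre_;
-- the "" default is never consulted under Pre_)
def pvSevOf (i : List (String × String)) : String :=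
  PySem.Dict.getD (PySem.Dict.mk i) "severity" ""

-- ===== PORT A =====
def get_improvement_priorities_py (issues : List (List (String × String))) (key_mgmt : List (String × List String)) (ssl_analysis : List (String × List String)) (random_analysis : List (String × List String)) : List String :=
  let priorities : List String := []
  let critical_issues := issues.filter (fun i => pvSevOf i == "CRITICAL")
  let priorities := if critical_issues != [] then priorities ++ ["Fix critical cryptographic vulnerabilities"] else priorities
  let high_issues := issues.filter (fun i => pvSevOf i == "HIGH")
  let priorities := if high_issues != [] then priorities ++ ["Address high-severity crypto issues"] else priorities
  let priorities := if PySem.Dict.getD (PySem.Dict.mk key_mgmt) "key_management_issues" [] != [] then priorities ++ ["Improve key management practices"] else priorities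
  let priorities := if PySem.Dict.getD (PySem.Dict.mk ssl_analysis) "ssl_issues" [] != [] then priorities ++ ["Fix SSL/TLS configuration issues"] else priorities
  let priorities := if PySem.Dict.getD (PySem.Dict.mk random_analysis) "weak_randomness_issues" [] != [] then priorities ++ ["Replace weak random number generation"] else priorities
  let medium_issues := issues.filter (fun i => pvSevOf i == "MEDIUM")
  let priorities := if medium_issues != [] then priorities ++ ["Resolve medium-severity crypto issues"] else priorities
  PySem.List.slice priorities none (some 5)

-- ===== PORT B =====
-- recursive budgeted builder from Source B (structural on the check list)
def pvBuild : List (Bool × String) → Nat → List String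
  | [], _ => []
  | _, 0 => []
  | (f, m) :: rest, Nat.succ b => if f then m :: pvBuild rest b else pvBuild rest (Nat.succ b)

def get_improvement_priorities_py_alt (issues : List (List (String × String))) (key_mgmt : List (String × List String)) (ssl_analysis : List (String × List String)) (random_analysis : List (String × List String)) : List String :=
  let flags := issues.foldl (fun (acc : Bool × Bool × Bool) i =>
    let s := pvSevOf i
    (acc.1 || s == "CRITICAL", acc.2.1 || s == "HIGH", acc.2.2 || s == "MEDIUM")) (false, false, false)
  let checks : List (Bool × String) :=
    [ (flags.1, "Fix critical cryptographic vulnerabilities"),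
      (flags.2.1, "Address high-severity crypto issues"),
      (PySem.Dict.getD (PySem.Dict.mk key_mgmt) "key_management_issues" [] != [], "Improve key management practices"),
      (PySem.Dict.getD (PySem.Dict.mk ssl_analysis) "ssl_issues" [] != [], "Fix SSL/TLS configuration issues"),
      (PySem.Dict.getD (PySem.Dict.mk random_analysis) "weak_randomness_issues" [] != [], "Replace weak random number generation"),
      (flags.2.2, "Resolve medium-severity crypto issues") ]
  pvBuild checks 5

-- ===== PRECONDITION & SPEC =====
-- Pre_ excludes exactly the inputs where some issue dict lacks the key 'severity':
-- there Python A (and B alike) raises KeyError on the first such element.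
def Pre_get_improvement_priorities_py (issues : List (List (String × String))) (key_mgmt : List (String × List String)) (ssl_analysis : List (String × List String)) (random_analysis : List (String × List String)) : Prop :=
  ∀ i ∈ issues, PySem.Dict.contains (PySem.Dict.mk i) "severity" = true
instance (issues : List (List (String × String))) (key_mgmt : List (String × List String)) (ssl_analysis : List (String × List String)) (random_analysis : List (String × List String)) : Decidable (Pre_get_improvement_priorities_py issues key_mgmt ssl_analysis random_analysis) := by unfold Pre_get_improvement_priorities_py; infer_instance

def pvWitness_get_improvement_priorities_py : (List (List (String × String))) × (List (String × List String)) × (List (String × List String)) × (List (String × List String)) :=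
  ([[("severity", "CRITICAL")], [("severity", "MEDIUM")]], [("key_management_issues", ["k"])], [], [("weak_randomness_issues", [])])

def Spec_get_improvement_priorities_py (issues : List (List (String × String))) (key_mgmt : List (String × List String)) (ssl_analysis : List (String × List String)) (random_analysis : List (String × List String)) (out : List String) : Prop := out = get_improvement_priorities_py_alt issues key_mgmt ssl_analysis random_analysis
instance (issues : List (List (String × String))) (key_mgmt : List (String × List String)) (ssl_analysis : List (String × List String)) (random_analysis : List (String × List String)) (out : List String) : Decidable (Spec_get_improvement_priorities_py issues key_mgmt ssl_analysis random_analysis out) := by unfold Spec_get_improvement_priorities_py; infer_instance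

-- ===== CLAIM (what is proved, stated in full; the proofs are below) =====
def Claim_equal_get_improvement_priorities_py : Prop := ∀ (issues : List (List (String × String))) (key_mgmt : List (String × List String)) (ssl_analysis : List (String × List String)) (random_analysis : List (String × List String)), Dom_get_improvement_priorities_py issues key_mgmt ssl_analysis random_analysis → Pre_get_improvement_priorities_py issues key_mgmt ssl_analysis random_analysis → Spec_get_improvement_priorities_py issues key_mgmt ssl_analysis random_analysis (get_improvement_priorities_py issues key_mgmt ssl_analysis random_analysis)

-- ===== LEMMAS AND PROOFS =====

lemma pv_filter_bne (issues : List (List (String × String))) (s : String) (a : Bool) :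
    (a || (issues.filter (fun i => pvSevOf i == s) != [])) =
      issues.foldl (fun acc i => acc || (pvSevOf i == s)) a := by
  induction issues generalizing a with
  | nil => simp
  | cons x t ih =>
    by_cases h : pvSevOf x = s
    · simp [List.filter, h, ← ih]
    · have h1 : (pvSevOf x == s) = false := beq_eq_false_iff_ne.mpr h
      simp [List.filter, h1, ← ih]

lemma pv_flags (issues : List (List (String × String))) (a b c : Bool) :
    issues.foldl (fun (acc : Bool × Bool × Bool) i =>
      let s := pvSevOf i
      (acc.1 || s == "CRITICAL", acc.2.1 || s == "HIGH", acc.2.2 || s == "MEDIUM")) (a, b, c)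
    = (issues.foldl (fun acc i => acc || (pvSevOf i == "CRITICAL")) a,
       issues.foldl (fun acc i => acc || (pvSevOf i == "HIGH")) b,
       issues.foldl (fun acc i => acc || (pvSevOf i == "MEDIUM")) c) := by
  induction issues generalizing a b c with
  | nil => rfl
  | cons x t ih => simp [List.foldl, ih]

-- ===== VERDICT (by name: the statement is the Claim_ definition above) =====
theorem get_improvement_priorities_py_spec : Claim_equal_get_improvement_priorities_py := by
  intro issues km ssl rnd _ _
  unfold Spec_get_improvement_priorities_py get_improvement_priorities_py get_improvement_priorities_py_alt
  simp only [pv_flags]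
  rw [← pv_filter_bne issues "CRITICAL" false, ← pv_filter_bne issues "HIGH" false,
      ← pv_filter_bne issues "MEDIUM" false]
  simp only [Bool.false_or]
  generalize (issues.filter (fun i => pvSevOf i == "CRITICAL") != []) = b1
  generalize (issues.filter (fun i => pvSevOf i == "HIGH") != []) = b2
  generalize (PySem.Dict.getD (PySem.Dict.mk km) "key_management_issues" [] != []) = b3
  generalize (PySem.Dict.getD (PySem.Dict.mk ssl) "ssl_issues" [] != []) = b4
  generalize (PySem.Dict.getD (PySem.Dict.mk rnd) "weak_randomness_issues" [] != []) = b5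
  generalize (issues.filter (fun i => pvSevOf i == "MEDIUM") != []) = b6
  cases b1 <;> cases b2 <;> cases b3 <;> cases b4 <;> cases b5 <;> cases b6 <;> rfl
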